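-- pv_equiv track=rewrite | github.com/tlucanti/school-21 | gen.py | gen_target_default
-- ===== SOURCE A (Python) =====
-- def gen_target_default(h):
--     target = [[0] * h for _ in range(h)]
--     i = 0
--     for y in range(h):
--         for x in range(h):
--             i += 1
--             target[y][x] = i
--     target[-1][-1] = 0
--     return target
-- ===== SOURCE B (Python) =====
-- def gen_target_default(h):
--     flat = list(range(1, h * h)) + [0]
--     return [flat[r * h:(r + 1) * h] for r in range(h)]
-- ===== Notes on version B (the rewrite author's own statement) =====
-- stated objective: alternative
-- what changed: B builds the whole sequence 1..h*h-1 plus a trailing 0 as ONE flat list and reshapes it into rows by slicing, instead of A's nested per-cell assignment loops with a running counter into a pre-built zero matrix.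
-- outside the precondition, e.g. on gen_target_default(0): A raises IndexError, B returns []
import Mathlib
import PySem

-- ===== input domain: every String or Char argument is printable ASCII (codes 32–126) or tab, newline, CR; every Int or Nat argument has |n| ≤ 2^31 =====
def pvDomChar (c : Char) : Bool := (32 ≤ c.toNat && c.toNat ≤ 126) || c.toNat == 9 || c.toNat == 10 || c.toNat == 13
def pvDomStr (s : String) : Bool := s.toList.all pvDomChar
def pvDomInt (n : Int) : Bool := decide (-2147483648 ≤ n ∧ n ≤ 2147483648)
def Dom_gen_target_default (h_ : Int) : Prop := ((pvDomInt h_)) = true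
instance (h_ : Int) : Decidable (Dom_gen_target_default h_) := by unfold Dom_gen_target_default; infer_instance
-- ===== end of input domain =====

-- B builds the whole sequence 1..h*h-1 plus a trailing 0 as one flat list and reshapes
-- it into rows by slicing, instead of A's nested per-cell assignment loops with a
-- running counter into a pre-built zero matrix; objective: alternative decomposition.

-- ===== PORT A =====
-- target = [[0] * h for _ in range(h)]; i = 0; nested loops writing i into target[y][x];
-- target[-1][-1] = 0 (negative index: last element; runs under Pre_ h ≥ 1, where it is in range)
def gen_target_default (h_ : Int) : List (List Int) :=
  let target0 : List (List Int) :=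
    (PySem.List.pyRange 0 h_ 1).map (fun _ => List.replicate h_.toNat (0 : Int))
  let st :=
    (PySem.List.pyRange 0 h_ 1).foldl (fun (st : List (List Int) × Int) y =>
      (PySem.List.pyRange 0 h_ 1).foldl (fun (st2 : List (List Int) × Int) x =>
        let i := st2.2 + 1
        (st2.1.set y.toNat ((st2.1.getD y.toNat []).set x.toNat i), i)) st)
      (target0, 0)
  let target := st.1
  let lastRow := target.getD (target.length - 1) []
  target.set (target.length - 1) (lastRow.set (lastRow.length - 1) 0)

-- ===== PORT B =====
-- flat = list(range(1, h*h)) + [0]; return [flat[r*h:(r+1)*h] for r in range(h)]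
def gen_target_default_alt (h_ : Int) : List (List Int) :=
  let flat := PySem.List.pyRange 1 (h_ * h_) 1 ++ [(0 : Int)]
  (PySem.List.pyRange 0 h_ 1).map (fun r =>
    PySem.List.slice flat (some (r * h_)) (some ((r + 1) * h_)))

-- ===== PRECONDITION & SPEC =====
-- A raises IndexError (target[-1][-1] on an empty matrix) whenever h <= 0; Pre_ excludes exactly those inputs.
def Pre_gen_target_default (h_ : Int) : Prop := 1 ≤ h_
instance (h_ : Int) : Decidable (Pre_gen_target_default h_) := by unfold Pre_gen_target_default; infer_instance
def pvWitness_gen_target_default : Int := (3)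

def Spec_gen_target_default (h_ : Int) (out : List (List Int)) : Prop := out = gen_target_default_alt h_
instance (h_ : Int) (out : List (List Int)) : Decidable (Spec_gen_target_default h_ out) := by unfold Spec_gen_target_default; infer_instance

-- ===== CLAIM (what is proved, stated in full; the proofs are below) =====
def Claim_equal_gen_target_default : Prop := ∀ (h_ : Int), Dom_gen_target_default h_ → Pre_gen_target_default h_ → Spec_gen_target_default h_ (gen_target_default h_)

-- ===== LEMMAS AND PROOFS =====

-- row y of the h×h sequential matrix (before the final zeroing)
def pvRowB (n y : Nat) : List Int := (List.range n).map (fun x : Nat => (y : Int) * n + x + 1)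

-- B's flat list, on the Nat side: [1, …, n*n-1] ++ [0]
def pvFlat (n : Nat) : List Int :=
  (List.range (n * n - 1)).map (fun k : Nat => (1 : Int) + k) ++ [(0 : Int)]

-- write cells 0..k-1 of r with i+1..i+k (the effect of A's inner loop, right-to-left view)
def pvWc (r : List Int) (i : Int) : Nat → List Int
  | 0 => r
  | k+1 => (pvWc r i k).set k (i + k + 1)

-- inner fold of A's port over range n, at row y, from counter i
theorem pv_inner (n : Nat) (y : Nat) (t : List (List Int)) (hy : y < t.length) (i : Int) :
    ((List.range n).map (fun k : Nat => (k : Int))).foldl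
      (fun (st2 : List (List Int) × Int) x =>
        (st2.1.set y ((st2.1.getD y []).set x.toNat (st2.2 + 1)), st2.2 + 1)) (t, i)
    = (t.set y (pvWc (t.getD y []) i n), i + n) := by
  induction n with
  | zero => simp [pvWc, List.getElem?_eq_getElem hy, List.set_getElem_self]
  | succ n ih =>
      rw [List.range_succ, List.map_append, List.foldl_append, ih]
      simp only [List.map_cons, List.map_nil, List.foldl_cons, List.foldl_nil]
      have hset : (t.set y (pvWc (t.getD y []) i n)).getD y [] = pvWc (t.getD y []) i n := by
        rw [List.getD_eq_getElem?_getD]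
        rw [List.getElem?_set_self (by simpa using hy)]
        rfl
      rw [hset, List.set_set]
      simp only [Int.toNat_natCast, pvWc, Prod.mk.injEq]
      refine ⟨?_, ?_⟩ <;> first | trivial | (push_cast; ring)

theorem pvWc_replicate (n : Nat) (i : Int) (k : Nat) (hk : k ≤ n) :
    pvWc (List.replicate n (0 : Int)) i k
      = (List.range k).map (fun x : Nat => i + x + 1) ++ List.replicate (n - k) 0 := by
  induction k with
  | zero => simp [pvWc]
  | succ k ih =>
      rw [pvWc, ih (by omega), List.range_succ, List.map_append]
      have hrep : List.replicate (n - k) (0 : Int) = 0 :: List.replicate (n - (k+1)) 0 := by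
        have : n - k = (n - (k+1)) + 1 := by omega
        rw [this, List.replicate_succ]
      rw [hrep]
      rw [List.set_append_right _ _ (by simp)]
      simp

-- outer fold of A's port, first m rows
theorem pv_outer (n : Nat) (m : Nat) (hm : m ≤ n) :
    ((List.range m).map (fun k : Nat => (k : Int))).foldl
      (fun (st : List (List Int) × Int) y =>
        ((List.range n).map (fun k : Nat => (k : Int))).foldl
          (fun (st2 : List (List Int) × Int) x =>
            (st2.1.set y.toNat ((st2.1.getD y.toNat []).set x.toNat (st2.2 + 1)), st2.2 + 1)) st)
      (List.replicate n (List.replicate n (0 : Int)), 0)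
    = ((List.range m).map (pvRowB n) ++ List.replicate (n - m) (List.replicate n 0),
        (m : Int) * n) := by
  induction m with
  | zero => simp
  | succ m ih =>
      rw [List.range_succ, List.map_append, List.foldl_append, ih (by omega)]
      simp only [List.map_cons, List.map_nil, List.foldl_cons, List.foldl_nil, Int.toNat_natCast]
      set done := (List.range m).map (pvRowB n) with hdone
      have hlen : done.length = m := by simp [hdone]
      have hrep : List.replicate (n - m) (List.replicate n (0 : Int))
          = List.replicate n 0 :: List.replicate (n - (m+1)) (List.replicate n 0) := by
        have : n - m = (n - (m+1)) + 1 := by omega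
        rw [this, List.replicate_succ]
      have htlen : (done ++ List.replicate (n - m) (List.replicate n (0 : Int))).length = n := by
        simp [hlen]; omega
      rw [pv_inner n m _ (by rw [htlen]; omega)]
      have hget : (done ++ List.replicate (n - m) (List.replicate n (0 : Int))).getD m []
          = List.replicate n 0 := by
        rw [hrep, List.getD_eq_getElem?_getD, List.getElem?_append_right (by omega)]
        simp [hlen]
      rw [hget, pvWc_replicate n _ n (le_refl n)]
      simp only [Nat.sub_self, List.replicate_zero, List.append_nil, Prod.mk.injEq]
      refine ⟨?_, by push_cast; ring⟩
      rw [hrep, List.set_append_right _ _ (by omega)]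
      simp only [hlen, Nat.sub_self, List.set_cons_zero]
      rw [List.map_append]
      simp only [List.map_cons, List.map_nil, List.append_assoc, List.cons_append,
        List.nil_append, pvRowB]
      rw [← hdone]

theorem pvRange_cast (n : Nat) :
    PySem.List.pyRange 0 (n : Int) 1 = (List.range n).map (fun k : Nat => (k : Int)) := by
  rw [PySem.List.pyRange_one]
  simp

-- slice r of B's flat list is row r, with the last cell of the last row already 0
theorem pvSliceRow (n j : Nat) (h1 : 1 ≤ n) (hj : j < n) :
    PySem.List.slice (pvFlat n) (some ((j : Int) * n)) (some (((j : Int) + 1) * n))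
      = if j = n - 1 then (pvRowB n (n - 1)).set (n - 1) 0 else pvRowB n j := by
  have e1 : ((j : Int) * n) = ((j * n : Nat) : Int) := by push_cast; ring
  have e2 : (((j : Int) + 1) * n) = ((j * n : Nat) : Int) + ((n : Nat) : Int) := by push_cast; ring
  rw [e1, e2, PySem.List.slice_natCast_add]
  have hnn : 1 ≤ n * n := Nat.mul_pos h1 h1
  have hjn : j * n + n ≤ n * n := by
    have h := Nat.mul_le_mul_right n (show j + 1 ≤ n by omega)
    have he : (j + 1) * n = j * n + n := by ring
    omega
  have hflatlen : (pvFlat n).length = n * n := by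
    simp [pvFlat]; omega
  have hdroplen : ((pvFlat n).drop (j * n)).length = n * n - j * n := by
    simp [hflatlen]
  apply List.ext_getElem
  · rw [List.length_take, hdroplen]
    split <;> simp [pvRowB] <;> omega
  · intro x hx _
    have hxn : x < n := by
      rw [List.length_take] at hx; omega
    rw [List.getElem_take, List.getElem_drop]
    have hix : j * n + x < n * n := by omega
    by_cases hlast : j * n + x = n * n - 1
    · have hj' : j = n - 1 := by
        by_contra hne
        have h2 := Nat.mul_le_mul_right n (show j + 2 ≤ n by omega)
        have he : (j + 2) * n = j * n + 2 * n := by ring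
        omega
      have hx' : x = n - 1 := by
        have h2 := Nat.mul_le_mul_right n (show j ≤ n - 1 by omega)
        have h3 : (n - 1) * n + n = n * n := by
          obtain ⟨m, rfl⟩ : ∃ m, n = m + 1 := ⟨n - 1, by omega⟩
          simp; ring
        have h4 := Nat.mul_le_mul_right n (show n - 1 ≤ j by omega)
        omega
      have hz : (pvFlat n)[j * n + x]'(by omega) = (0 : Int) := by
        simp only [pvFlat]
        rw [List.getElem_append_right (by simp; omega)]
        simp
      rw [hz]
      simp only [if_pos hj']
      rw [List.getElem_set]
      rw [if_pos (by omega)]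
    · have hin : j * n + x < n * n - 1 := by omega
      have hval : (pvFlat n)[j * n + x]'(by omega) = (1 : Int) + (j * n + x : Nat) := by
        simp only [pvFlat]
        rw [List.getElem_append_left (by simpa using hin)]
        simp
      rw [hval]
      by_cases hjl : j = n - 1
      · simp only [if_pos hjl]
        have hxne : x ≠ n - 1 := by
          intro hxeq
          apply hlast
          obtain ⟨m, rfl⟩ : ∃ m, n = m + 1 := ⟨n - 1, by omega⟩
          simp only [Nat.add_sub_cancel] at hjl hxeq ⊢
          subst hjl; subst hxeq; ring_nf; omega
        rw [List.getElem_set, if_neg (by omega)]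
        simp only [pvRowB, List.getElem_map, List.getElem_range]
        rw [← hjl]
        push_cast; ring
      · simp only [if_neg hjl]
        simp only [pvRowB, List.getElem_map, List.getElem_range]
        push_cast; ring

-- ===== VERDICT (by name: the statement is the Claim_ definition above) =====
theorem gen_target_default_spec : Claim_equal_gen_target_default := by
  intro h hdom hpre
  unfold Pre_gen_target_default at hpre
  unfold Spec_gen_target_default gen_target_default gen_target_default_alt
  have hn : h = ((h.toNat : Nat) : Int) := by omega
  set n := h.toNat with hn'
  have hn1 : 1 ≤ n := by omega
  rw [hn, pvRange_cast]
  dsimp only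
  rw [show ((List.range n).map (fun k : Nat => (k : Int))).map
        (fun _ => List.replicate n (0 : Int))
      = List.replicate n (List.replicate n 0) by
    simp [List.eq_replicate_iff]]
  rw [pv_outer n n (le_refl n)]
  simp only [Nat.sub_self, List.replicate_zero, List.append_nil]
  -- A's value: rows pvRowB with the last cell of the last row zeroed
  set T := (List.range n).map (pvRowB n) with hT
  have hTlen : T.length = n := by simp [hT]
  have hTget : T.getD (T.length - 1) [] = pvRowB n (n - 1) := by
    rw [hT, List.getD_eq_getElem?_getD]
    simp only [List.length_map, List.length_range]
    rw [List.getElem?_map, List.getElem?_range (by omega)]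
    rfl
  have hRlen : (pvRowB n (n - 1)).length = n := by simp [pvRowB]
  rw [hTget, hRlen, hTlen]
  -- B's value
  have hflat : PySem.List.pyRange 1 ((n : Int) * n) 1
      = (List.range (n * n - 1)).map (fun k : Nat => (1 : Int) + k) := by
    rw [PySem.List.pyRange_one]
    congr 1
    have hnn : 1 ≤ n * n := Nat.mul_pos hn1 hn1
    have hc : ((n * n - 1 : Nat) : Int) = (n : Int) * n - 1 := by
      rw [Nat.cast_sub hnn]; push_cast; ring
    rw [← hc, Int.toNat_natCast]
  rw [hflat, List.map_map]
  apply List.ext_getElem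
  · simp [hTlen]
  · intro i hi hi'
    have hin : i < n := by simpa [hTlen] using hi
    simp only [List.getElem_map, List.getElem_range, Function.comp]
    have := pvSliceRow n i hn1 hin
    rw [show ((fun k : Nat => (1 : Int) + k) = fun k : Nat => (1 : Int) + k) from rfl]
    rw [List.getElem_set]
    rw [pvFlat] at this
    rw [this]
    by_cases hie : i = n - 1
    · rw [if_pos hie, if_pos (by omega)]
    · rw [if_neg hie, if_neg (by omega)]
      simp [hT, List.getElem_map, List.getElem_range]
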